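-- pv_equiv track=rewrite | github.com/snickrscodes/derivcalc | derivativecalculator.py | find_main_operator
-- ===== SOURCE A (Python) =====
-- BIN_OPS = ['+', '-', '*', '/', '^']
--
-- UN_OPS = [
--     'inv', 'neg', 'sqrt', 'cbrt', 'exp', 'ln', 'log', 'abs', 'sign',
--     'sin', 'cos', 'tan', 'csc', 'sec', 'cot', 'asin', 'acos', 'atan',
--     'acsc', 'asec', 'acot', 'sinh', 'cosh', 'tanh', 'csch', 'sech', 'erf',
--     'coth', 'asinh', 'acosh', 'atanh', 'acsch', 'asech', 'acoth', 'W'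
-- ]
--
-- def prio(op: str):
--     if op in '+-':
--         return 1
--     elif op in '*/':
--         return 2
--     elif op == '^':
--         return 3
--     elif op in UN_OPS:
--         return 4
--     return 0
--
-- def find_main_operator(expr):
--         min_p = 4
--         index = -1
--         bracket_count = 0
--         for i, c in enumerate(expr):
--             if c == '(':
--                 bracket_count += 1
--             elif c == ')':
--                 bracket_count -= 1
--             elif bracket_count == 0 and c in BIN_OPS:
--                 p = prio(c)
--                 if p <= min_p:
--                     min_p = p
--                     index = i
--         return index
-- ===== SOURCE B (Python) =====
-- def _level(c):
--     if c in '+-':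
--         return 1
--     elif c in '*/':
--         return 2
--     elif c == '^':
--         return 3
--     return 0
--
-- def find_main_operator(expr):
--     # precedence-ordered scans: for each priority level from lowest to highest,
--     # find the rightmost top-level operator of that level; first hit wins
--     for level in (1, 2, 3):
--         depth = 0
--         idx = -1
--         for i, c in enumerate(expr):
--             if c == '(':
--                 depth += 1
--             elif c == ')':
--                 depth -= 1
--             elif depth == 0 and _level(c) == level:
--                 idx = i
--         if idx != -1:
--             return idx
--     return -1
-- ===== Notes on version B (the rewrite author's own statement) =====
-- stated objective: alternative
-- what changed: Replaces the single min-priority-tracking pass with up to three precedence-ordered scans (levels 1,2,3), each recording the rightmost bracket-depth-0 operator of that level and returning on the first level that matches, as a recursive-descent parser would.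
import Mathlib
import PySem

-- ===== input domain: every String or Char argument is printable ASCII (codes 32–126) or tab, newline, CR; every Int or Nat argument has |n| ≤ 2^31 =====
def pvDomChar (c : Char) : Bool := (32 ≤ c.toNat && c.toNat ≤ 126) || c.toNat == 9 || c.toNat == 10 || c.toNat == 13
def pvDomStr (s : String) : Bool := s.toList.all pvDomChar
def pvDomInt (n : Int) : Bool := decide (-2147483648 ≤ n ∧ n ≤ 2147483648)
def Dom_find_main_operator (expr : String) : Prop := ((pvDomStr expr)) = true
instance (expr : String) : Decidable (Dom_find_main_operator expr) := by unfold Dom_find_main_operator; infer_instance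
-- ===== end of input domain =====

-- B replaces A's single min-tracking pass by precedence-ordered scans (one per level, first level with a match wins); alternative decomposition, same cost.

-- ===== PORT A =====
-- 'c in BIN_OPS'
def pvIsBin (c : Char) : Bool := c = '+' ∨ c = '-' ∨ c = '*' ∨ c = '/' ∨ c = '^'

-- prio(op) for a single character (the only list element of UN_OPS a single char can equal is 'W')
def pvPrio (c : Char) : Int :=
  if c = '+' ∨ c = '-' then 1
  else if c = '*' ∨ c = '/' then 2
  else if c = '^' then 3
  else if c = 'W' then 4
  else 0

-- the 'for i, c in enumerate(expr)' loop, carrying (min_p, index, bracket_count)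
def pvALoop : List Char → Int → Int → Int → Int → Int
  | [], _, _, index, _ => index
  | c :: rest, i, minp, index, bc =>
    if c = '(' then pvALoop rest (i+1) minp index (bc+1)
    else if c = ')' then pvALoop rest (i+1) minp index (bc-1)
    else if bc = 0 ∧ pvIsBin c then
      let p := pvPrio c
      if p ≤ minp then pvALoop rest (i+1) p i bc
      else pvALoop rest (i+1) minp index bc
    else pvALoop rest (i+1) minp index bc

def find_main_operator (expr : String) : Int := pvALoop expr.toList 0 4 (-1) 0

-- ===== PORT B =====
-- _level(c)
def pvLevelOf (c : Char) : Int :=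
  if c = '+' ∨ c = '-' then 1
  else if c = '*' ∨ c = '/' then 2
  else if c = '^' then 3
  else 0

-- one scan for a fixed level: rightmost index with depth == 0 and _level(c) == level
def pvBLoop : List Char → Int → Int → Int → Int → Int
  | [], _, _, _, idx => idx
  | c :: rest, i, lv, d, idx =>
    if c = '(' then pvBLoop rest (i+1) lv (d+1) idx
    else if c = ')' then pvBLoop rest (i+1) lv (d-1) idx
    else if d = 0 ∧ pvLevelOf c = lv then pvBLoop rest (i+1) lv d i
    else pvBLoop rest (i+1) lv d idx

-- 'for level in (1, 2, 3): … if idx != -1: return idx' / 'return -1'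
def pvLevels : List Int → List Char → Int
  | [], _ => -1
  | lv :: rest, cs =>
    let idx := pvBLoop cs 0 lv 0 (-1)
    if idx ≠ -1 then idx else pvLevels rest cs

def find_main_operator_alt (expr : String) : Int := pvLevels [1, 2, 3] expr.toList

-- ===== PRECONDITION & SPEC =====
def Spec_find_main_operator (expr : String) (out : Int) : Prop := out = find_main_operator_alt expr
instance (expr : String) (out : Int) : Decidable (Spec_find_main_operator expr out) := by unfold Spec_find_main_operator; infer_instance

-- ===== CLAIM (what is proved, stated in full; the proofs are below) =====
def Claim_equal_find_main_operator : Prop := ∀ (expr : String), Dom_find_main_operator expr → Spec_find_main_operator expr (find_main_operator expr)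

-- ===== LEMMAS AND PROOFS =====

-- abstract A's carried (min_p, index) from B's three per-level rightmost indices
def pvMkP (r1 r2 r3 : Int) : Int :=
  if r1 ≠ -1 then 1 else if r2 ≠ -1 then 2 else if r3 ≠ -1 then 3 else 4

def pvMkI (r1 r2 r3 : Int) : Int :=
  if r1 ≠ -1 then r1 else if r2 ≠ -1 then r2 else if r3 ≠ -1 then r3 else -1

theorem pv_key (l : List Char) : ∀ (i bc r1 r2 r3 : Int), 0 ≤ i →
    pvALoop l i (pvMkP r1 r2 r3) (pvMkI r1 r2 r3) bc =
      pvMkI (pvBLoop l i 1 bc r1) (pvBLoop l i 2 bc r2) (pvBLoop l i 3 bc r3) := by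
  induction l with
  | nil => intro i bc r1 r2 r3 _; simp [pvALoop, pvBLoop]
  | cons c rest ih =>
    intro i bc r1 r2 r3 hi
    have hi' : (0:Int) ≤ i + 1 := by omega
    have hine : i ≠ -1 := by omega
    by_cases h1 : c = '('
    · simp [pvALoop, pvBLoop, h1, ih (i+1) (bc+1) r1 r2 r3 hi']
    by_cases h2 : c = ')'
    · simp [pvALoop, pvBLoop, h2, ih (i+1) (bc-1) r1 r2 r3 hi']
    by_cases hbc : bc = 0
    · subst hbc
      by_cases hp1 : c = '+' ∨ c = '-'
      · -- level-1 operator at depth 0: A always updates (1 ≤ min_p)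
        have hge : (1:Int) ≤ pvMkP r1 r2 r3 := by
          unfold pvMkP; split_ifs <;> norm_num
        have hlv : pvLevelOf c = 1 := by
          rcases hp1 with h | h <;> simp [pvLevelOf, h]
        have hA : pvALoop (c :: rest) i (pvMkP r1 r2 r3) (pvMkI r1 r2 r3) 0 =
            pvALoop rest (i+1) 1 i 0 := by
          rcases hp1 with h | h <;>
            simp [pvALoop, h1, h2, pvIsBin, pvPrio, h] <;>
            exact fun hlt => absurd hge (by omega)
        have hthis := ih (i+1) 0 i r2 r3 hi'
        have hmp : pvMkP i r2 r3 = 1 := by simp [pvMkP, hine]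
        have hmi : pvMkI i r2 r3 = i := by simp [pvMkI, hine]
        rw [hmp, hmi] at hthis
        have hB1 : pvBLoop (c :: rest) i 1 0 r1 = pvBLoop rest (i+1) 1 0 i := by
          simp [pvBLoop, h1, h2, hlv]
        have hB : ∀ lv r, lv ≠ 1 →
            pvBLoop (c :: rest) i lv 0 r = pvBLoop rest (i+1) lv 0 r := by
          intro lv r hlv1; simp [pvBLoop, h1, h2, hlv]; omega
        rw [hA, hthis, hB1, hB 2 r2 (by omega), hB 3 r3 (by omega)]
      by_cases hp2 : c = '*' ∨ c = '/'
      · have hlv : pvLevelOf c = 2 := by simp [pvLevelOf, hp1, hp2]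
        have hpr : pvPrio c = 2 := by simp [pvPrio, hp1, hp2]
        have hbin : pvIsBin c = true := by
          simp [pvIsBin]; rcases hp2 with h | h <;> simp [h]
        have hB : ∀ lv r, lv ≠ 2 →
            pvBLoop (c :: rest) i lv 0 r = pvBLoop rest (i+1) lv 0 r := by
          intro lv r hlv2; simp [pvBLoop, h1, h2, hlv]; omega
        have hB2 : pvBLoop (c :: rest) i 2 0 r2 = pvBLoop rest (i+1) 2 0 i := by
          simp [pvBLoop, h1, h2, hlv]
        by_cases hr1 : r1 = -1
        · -- no level-1 operator seen yet: A updates to (2, i)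
          have hge : (2:Int) ≤ pvMkP r1 r2 r3 := by
            unfold pvMkP; simp [hr1]; split_ifs <;> norm_num
          have hA : pvALoop (c :: rest) i (pvMkP r1 r2 r3) (pvMkI r1 r2 r3) 0 =
              pvALoop rest (i+1) 2 i 0 := by
            simp [pvALoop, h1, h2, hbin, hpr]
            exact fun hlt => absurd hge (by omega)
          have hthis := ih (i+1) 0 r1 i r3 hi'
          have hmp : pvMkP r1 i r3 = 2 := by simp [pvMkP, hr1, hine]
          have hmi : pvMkI r1 i r3 = i := by simp [pvMkI, hr1, hine]
          rw [hmp, hmi] at hthis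
          rw [hA, hthis, hB 1 r1 (by omega), hB 3 r3 (by omega), hB2]
        · -- a level-1 operator exists: A keeps (1, r1); B's level-2 record is invisible to pvMkI
          have hmp1 : pvMkP r1 r2 r3 = 1 := by simp [pvMkP, hr1]
          have hA : pvALoop (c :: rest) i (pvMkP r1 r2 r3) (pvMkI r1 r2 r3) 0 =
              pvALoop rest (i+1) (pvMkP r1 r2 r3) (pvMkI r1 r2 r3) 0 := by
            simp [pvALoop, h1, h2, hbin, hpr, hmp1]
          have hthis := ih (i+1) 0 r1 i r3 hi'
          have hmp : pvMkP r1 i r3 = pvMkP r1 r2 r3 := by simp [pvMkP, hr1]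
          have hmi : pvMkI r1 i r3 = pvMkI r1 r2 r3 := by simp [pvMkI, hr1]
          rw [hmp, hmi] at hthis
          rw [hA, hthis, hB 1 r1 (by omega), hB 3 r3 (by omega), hB2]
      by_cases hp3 : c = '^'
      · have hlv : pvLevelOf c = 3 := by simp [pvLevelOf, hp1, hp2, hp3]
        have hpr : pvPrio c = 3 := by simp [pvPrio, hp1, hp2, hp3]
        have hbin : pvIsBin c = true := by simp [pvIsBin, hp3]
        have hB : ∀ lv r, lv ≠ 3 →
            pvBLoop (c :: rest) i lv 0 r = pvBLoop rest (i+1) lv 0 r := by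
          intro lv r hlv3; simp [pvBLoop, h1, h2, hlv]; omega
        have hB3 : pvBLoop (c :: rest) i 3 0 r3 = pvBLoop rest (i+1) 3 0 i := by
          simp [pvBLoop, h1, h2, hlv]
        by_cases hr12 : r1 = -1 ∧ r2 = -1
        · -- no level-1/2 operator seen yet: A updates to (3, i)
          have hge : (3:Int) ≤ pvMkP r1 r2 r3 := by
            unfold pvMkP; simp [hr12.1, hr12.2]; split_ifs <;> norm_num
          have hA : pvALoop (c :: rest) i (pvMkP r1 r2 r3) (pvMkI r1 r2 r3) 0 =
              pvALoop rest (i+1) 3 i 0 := by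
            simp [pvALoop, h1, h2, hbin, hpr]
            exact fun hlt => absurd hge (by omega)
          have hthis := ih (i+1) 0 r1 r2 i hi'
          have hmp : pvMkP r1 r2 i = 3 := by simp [pvMkP, hr12.1, hr12.2, hine]
          have hmi : pvMkI r1 r2 i = i := by simp [pvMkI, hr12.1, hr12.2, hine]
          rw [hmp, hmi] at hthis
          rw [hA, hthis, hB 1 r1 (by omega), hB 2 r2 (by omega), hB3]
        · -- some lower-level operator exists: A's state is unchanged
          have hlt : pvMkP r1 r2 r3 < 3 := by
            unfold pvMkP; rcases not_and_or.mp hr12 with h | h <;>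
              simp [h] <;> split_ifs <;> norm_num
          have hA : pvALoop (c :: rest) i (pvMkP r1 r2 r3) (pvMkI r1 r2 r3) 0 =
              pvALoop rest (i+1) (pvMkP r1 r2 r3) (pvMkI r1 r2 r3) 0 := by
            simp [pvALoop, h1, h2, hbin, hpr]
            exact fun hge => absurd hge (by omega)
          have hthis := ih (i+1) 0 r1 r2 i hi'
          have hmp : pvMkP r1 r2 i = pvMkP r1 r2 r3 := by
            simp [pvMkP]; rcases not_and_or.mp hr12 with h | h <;> simp [h]
          have hmi : pvMkI r1 r2 i = pvMkI r1 r2 r3 := by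
            simp [pvMkI]; rcases not_and_or.mp hr12 with h | h <;> simp [h]
          rw [hmp, hmi] at hthis
          rw [hA, hthis, hB 1 r1 (by omega), hB 2 r2 (by omega), hB3]
      · -- not a binary operator at depth 0: everything passes through
        have hbin : pvIsBin c = false := by
          simp [pvIsBin]
          refine ⟨?_, ?_, ?_, ?_, ?_⟩ <;> intro h <;>
            first
              | exact hp1 (Or.inl h) | exact hp1 (Or.inr h)
              | exact hp2 (Or.inl h) | exact hp2 (Or.inr h)
              | exact hp3 h
        have hlv : pvLevelOf c = 0 := by simp [pvLevelOf, hp1, hp2, hp3]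
        have hB : ∀ lv r, lv ≠ 0 →
            pvBLoop (c :: rest) i lv 0 r = pvBLoop rest (i+1) lv 0 r := by
          intro lv r hlv0; simp [pvBLoop, h1, h2, hlv]; omega
        have hA : pvALoop (c :: rest) i (pvMkP r1 r2 r3) (pvMkI r1 r2 r3) 0 =
            pvALoop rest (i+1) (pvMkP r1 r2 r3) (pvMkI r1 r2 r3) 0 := by
          simp [pvALoop, h1, h2, hbin]
        rw [hA, ih (i+1) 0 r1 r2 r3 hi', hB 1 r1 (by omega), hB 2 r2 (by omega),
          hB 3 r3 (by omega)]
    · -- depth ≠ 0: neither loop records anything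
      have hA : pvALoop (c :: rest) i (pvMkP r1 r2 r3) (pvMkI r1 r2 r3) bc =
          pvALoop rest (i+1) (pvMkP r1 r2 r3) (pvMkI r1 r2 r3) bc := by
        simp [pvALoop, h1, h2, hbc]
      have hB : ∀ lv r, pvBLoop (c :: rest) i lv bc r = pvBLoop rest (i+1) lv bc r := by
        intro lv r; simp [pvBLoop, h1, h2, hbc]
      rw [hA, ih (i+1) bc r1 r2 r3 hi', hB 1 r1, hB 2 r2, hB 3 r3]

theorem pv_alt_eq_mk (cs : List Char) :
    pvLevels [1, 2, 3] cs =
      pvMkI (pvBLoop cs 0 1 0 (-1)) (pvBLoop cs 0 2 0 (-1)) (pvBLoop cs 0 3 0 (-1)) := by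
  by_cases e1 : pvBLoop cs 0 1 0 (-1) = -1 <;>
    by_cases e2 : pvBLoop cs 0 2 0 (-1) = -1 <;>
      by_cases e3 : pvBLoop cs 0 3 0 (-1) = -1 <;>
        simp [pvLevels, pvMkI, e1, e2, e3]

-- ===== VERDICT (by name: the statement is the Claim_ definition above) =====
theorem find_main_operator_spec : Claim_equal_find_main_operator := by
  intro expr _
  unfold Spec_find_main_operator find_main_operator find_main_operator_alt
  rw [pv_alt_eq_mk]
  have h := pv_key expr.toList 0 0 (-1) (-1) (-1) (by omega)
  rw [show pvMkP (-1) (-1) (-1) = 4 by decide, show pvMkI (-1) (-1) (-1) = -1 by decide] at h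
  exact h
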